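-- pv_equiv track=rewrite | github.com/selfreferencing/erdos-ternary-digits | closing_the_gap.py | get_2_runs
-- ===== SOURCE A (Python) =====
-- def to_base3(n):
--     if n == 0:
--         return [0]
--     digits = []
--     while n > 0:
--         digits.append(n % 3)
--         n //= 3
--     return digits
--
-- def get_2_runs(n):
--     """Get the runs of consecutive 2s."""
--     digits = to_base3(n)
--     runs = []
--     i = 0
--     while i < len(digits):
--         if digits[i] == 2:
--             start = i
--             while i < len(digits) and digits[i] == 2:
--                 i += 1
--             runs.append((start, i - start))  # (position, length)
--         else:
--             i += 1
--     return runs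
-- ===== SOURCE B (Python) =====
-- def to_base3(n):
--     if n == 0:
--         return [0]
--     digits = []
--     while n > 0:
--         digits.append(n % 3)
--         n //= 3
--     return digits
--
-- def get_2_runs(n):
--     """Get the runs of consecutive 2s."""
--     # Pass 1: run-length encode the LSB-first digit list.
--     groups = []
--     for d in to_base3(n):
--         if groups and groups[-1][0] == d:
--             groups[-1][1] += 1
--         else:
--             groups.append([d, 1])
--     # Pass 2: emit (position, length) for groups of 2s, tracking an offset.
--     runs = []
--     off = 0
--     for k, c in groups:
--         if k == 2:
--             runs.append((off, c))
--         off += c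
--     return runs
-- ===== Notes on version B (the rewrite author's own statement) =====
-- stated objective: idiomatic
-- what changed: Replaces the index-walking nested-while scan with a two-pass run-length encoding (one fold building (digit,count) groups, then a pass emitting (offset,length) for key-2 groups).
import Mathlib
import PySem

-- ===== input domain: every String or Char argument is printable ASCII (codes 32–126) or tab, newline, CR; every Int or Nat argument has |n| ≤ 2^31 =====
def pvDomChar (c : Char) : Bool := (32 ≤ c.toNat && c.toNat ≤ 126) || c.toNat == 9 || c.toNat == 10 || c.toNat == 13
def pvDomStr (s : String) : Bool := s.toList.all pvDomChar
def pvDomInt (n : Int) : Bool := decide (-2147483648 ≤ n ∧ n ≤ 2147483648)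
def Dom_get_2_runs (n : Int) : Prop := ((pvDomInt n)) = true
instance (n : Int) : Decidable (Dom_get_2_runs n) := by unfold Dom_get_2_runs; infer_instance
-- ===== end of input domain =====

-- B replaces A's index-walking nested-while scan by a two-pass run-length encoding (idiomatic; same cost).

-- ===== PORT A =====
-- to_base3's while loop: digits appended LSB-first, n //= 3 each step
def to_base3_go (n : Int) : List Int :=
  if 0 < n then PySem.Int.mod n 3 :: to_base3_go (PySem.Int.floordiv n 3) else []
termination_by n.toNat
decreasing_by
  rename_i h
  have h3 : PySem.Int.floordiv n 3 = n / 3 := PySem.Int.floordiv_eq_ediv_of_pos (by omega)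
  rw [h3]; omega

def to_base3 (n : Int) : List Int :=
  if n == 0 then [0] else to_base3_go n

-- A's inner while: consume leading 2s, return how many and the remainder
def takeTwos : List Int → Nat × List Int
  | [] => (0, [])
  | d :: rest =>
    if d == 2 then ((takeTwos rest).1 + 1, (takeTwos rest).2)
    else (0, d :: rest)

theorem takeTwos_len : ∀ (l : List Int), (takeTwos l).2.length ≤ l.length := by
  intro l
  induction l with
  | nil => simp [takeTwos]
  | cons d rest ih =>
    by_cases h : d = 2
    · simp only [takeTwos, h, beq_self_eq_true, if_true, List.length_cons]
      omega
    · simp [takeTwos, h]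

-- A's outer while over the digit list, i the current index
def scanA : List Int → Int → List (Int × Int)
  | [], _ => []
  | d :: rest, i =>
    if d == 2 then
      (i, ((takeTwos rest).1 : Int) + 1) :: scanA (takeTwos rest).2 (i + (takeTwos rest).1 + 1)
    else scanA rest (i + 1)
termination_by l _ => l.length
decreasing_by
  · have := takeTwos_len rest; simp; omega
  · simp

def get_2_runs (n : Int) : List (Int × Int) := scanA (to_base3 n) 0

-- ===== PORT B =====
-- one step of B's first for-loop: merge d into the last group or open a new one
-- (the group list is kept reversed: head = Python's groups[-1]; reversed at the end)
def groupStep (acc : List (Int × Nat)) (d : Int) : List (Int × Nat) :=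
  match acc with
  | (k, c) :: t => if k == d then (k, c + 1) :: t else (d, 1) :: (k, c) :: t
  | [] => [(d, 1)]

-- B's second for-loop: emit (offset, length) for groups of 2s
def emitRuns : List (Int × Nat) → Int → List (Int × Int)
  | [], _ => []
  | (k, c) :: gs, off =>
    if k == 2 then (off, (c : Int)) :: emitRuns gs (off + c) else emitRuns gs (off + c)

def get_2_runs_alt (n : Int) : List (Int × Int) :=
  emitRuns (((to_base3 n).foldl groupStep []).reverse) 0

-- ===== PRECONDITION & SPEC =====
def Spec_get_2_runs (n : Int) (out : List (Int × Int)) : Prop := out = get_2_runs_alt n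
instance (n : Int) (out : List (Int × Int)) : Decidable (Spec_get_2_runs n out) := by unfold Spec_get_2_runs; infer_instance

-- ===== CLAIM (what is proved, stated in full; the proofs are below) =====
def Claim_equal_get_2_runs : Prop := ∀ (n : Int), Dom_get_2_runs n → Spec_get_2_runs n (get_2_runs n)

-- ===== LEMMAS AND PROOFS =====

-- span-style grouping, the common intermediate form: takeKey consumes leading d's
def takeKey (d : Int) : List Int → Nat × List Int
  | [] => (0, [])
  | e :: rest =>
    if e == d then ((takeKey d rest).1 + 1, (takeKey d rest).2)
    else (0, e :: rest)

theorem takeKey_len : ∀ (d : Int) (l : List Int), (takeKey d l).2.length ≤ l.length := by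
  intro d l
  induction l with
  | nil => simp [takeKey]
  | cons e rest ih =>
    by_cases h : e = d
    · simp only [takeKey, h, beq_self_eq_true, if_true, List.length_cons]
      omega
    · simp [takeKey, h]

theorem takeKey_rest_head : ∀ (d : Int) (l : List Int) (x : Int) (tl : List Int),
    (takeKey d l).2 = x :: tl → x ≠ d := by
  intro d l
  induction l with
  | nil => intro x tl h; simp [takeKey] at h
  | cons e rest ih =>
    intro x tl h
    by_cases he : e = d
    · simp only [takeKey, he, beq_self_eq_true, if_true] at h
      exact ih x tl h
    · have hne : (e == d) = false := by simpa using he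
      simp only [takeKey, hne] at h
      cases h; simpa using he

theorem takeTwos_eq_takeKey : ∀ (l : List Int), takeTwos l = takeKey 2 l := by
  intro l
  induction l with
  | nil => rfl
  | cons d rest ih => by_cases h : d = 2 <;> simp [takeTwos, takeKey, h, ih]

def groupRuns : List Int → List (Int × Nat)
  | [] => []
  | d :: rest => (d, (takeKey d rest).1 + 1) :: groupRuns (takeKey d rest).2
termination_by l => l.length
decreasing_by
  have := takeKey_len d rest; simp; omega

theorem foldl_groupStep_absorb :
    ∀ (l : List Int) (d : Int) (c : Nat) (acc : List (Int × Nat)),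
      l.foldl groupStep ((d, c) :: acc) =
        (takeKey d l).2.foldl groupStep ((d, c + (takeKey d l).1) :: acc) := by
  intro l
  induction l with
  | nil => intro d c acc; simp [takeKey]
  | cons e rest ih =>
    intro d c acc
    by_cases h : e = d
    · subst h
      simp only [takeKey, beq_self_eq_true, if_true, List.foldl_cons, groupStep]
      rw [ih]
      have harith : c + 1 + (takeKey e rest).1 = c + ((takeKey e rest).1 + 1) := by omega
      rw [harith]
    · have hne : (e == d) = false := by simpa using h
      simp [takeKey, hne]

theorem foldl_groupStep_fresh :
    ∀ (l : List Int) (acc : List (Int × Nat)),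
      (∀ k c t, acc = (k, c) :: t → ∀ x tl, l = x :: tl → x ≠ k) →
      l.foldl groupStep acc = (groupRuns l).reverse ++ acc := by
  intro l
  induction l using groupRuns.induct with
  | case1 => intro acc _; simp [groupRuns]
  | case2 d rest ih =>
    intro acc hfresh
    have hstep : groupStep acc d = (d, 1) :: acc := by
      match acc with
      | [] => rfl
      | (k, c) :: t =>
        have hdk : d ≠ k := hfresh k c t rfl d rest rfl
        simp [groupStep, Ne.symm hdk]
    rw [List.foldl_cons, hstep, foldl_groupStep_absorb]
    rw [ih ((d, 1 + (takeKey d rest).1) :: acc)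
        (by intro k c t h x tl hx
            cases h
            exact takeKey_rest_head d rest x tl hx)]
    simp [groupRuns, Nat.add_comm]

theorem scanA_skip :
    ∀ (l : List Int) (d : Int) (i : Int), d ≠ 2 →
      scanA (d :: l) i = scanA (takeKey d l).2 (i + (takeKey d l).1 + 1) := by
  intro l
  induction l with
  | nil => intro d i hd; simp [scanA, takeKey, hd]
  | cons e rest ih =>
    intro d i hd
    have hd' : (d == 2) = false := by simpa using hd
    by_cases h : e = d
    · subst h
      have h1 : scanA (e :: e :: rest) i = scanA (e :: rest) (i + 1) := by
        simp [scanA, hd']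
      rw [h1, ih e (i + 1) hd]
      simp only [takeKey, beq_self_eq_true, if_true]
      congr 1
      push_cast; ring
    · have hne : (e == d) = false := by simpa using h
      simp only [takeKey, hne]
      simp [scanA, hd']

theorem scanA_eq_emit :
    ∀ (l : List Int) (i : Int), scanA l i = emitRuns (groupRuns l) i := by
  intro l
  induction l using groupRuns.induct with
  | case1 => intro i; simp [scanA, groupRuns, emitRuns]
  | case2 d rest ih =>
    intro i
    by_cases hd : d = 2
    · subst hd
      simp only [scanA, beq_self_eq_true, if_true, takeTwos_eq_takeKey]
      rw [ih]
      simp only [groupRuns, emitRuns, beq_self_eq_true, if_true]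
      have hc : ((takeKey 2 rest).1 : Int) + 1 = (((takeKey 2 rest).1 + 1 : Nat) : Int) := by push_cast; ring
      have hi : i + ((takeKey 2 rest).1 : Int) + 1 = i + (((takeKey 2 rest).1 + 1 : Nat) : Int) := by push_cast; ring
      rw [hc, hi]
    · have h2 : (d == 2) = false := by simpa using hd
      rw [scanA_skip rest d i hd, ih]
      simp only [groupRuns, emitRuns, h2]
      congr 1
      push_cast; ring

-- ===== VERDICT (by name: the statement is the Claim_ definition above) =====
theorem get_2_runs_spec : Claim_equal_get_2_runs := by
  intro n _
  unfold Spec_get_2_runs get_2_runs get_2_runs_alt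
  rw [foldl_groupStep_fresh _ _ (by intro k c t h; simp at h), List.append_nil,
    List.reverse_reverse, scanA_eq_emit]
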